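-- pv_equiv track=rewrite | github.com/42elenz/Alfa_Training_Weiterbildung | Python/pubcrawler/crawl.py | filestring_to_sorted
-- ===== SOURCE A (Python) =====
-- def filestring_to_sorted(termlist, filecontent_string):
--     content = filecontent_string.split()
--     ergebnis_liste = {}
--     for el in content:
--         if el not in termlist:
--             if len(el) > 2: #um ganz kurze Wörter rauszufiltern
--                 if el in ergebnis_liste:
--                     ergebnis_liste[el] += 1
--                 else:
--                     ergebnis_liste[el] = 1
--     sortiert = sorted(ergebnis_liste.items(), key=lambda e: e[1], reverse=True)
--     return sortiert
-- ===== SOURCE B (Python) =====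
-- def filestring_to_sorted(termlist, filecontent_string):
--     freq = {}
--     for el in filecontent_string.split():
--         if el not in termlist and len(el) > 2:
--             freq[el] = freq.get(el, 0) + 1
--     buckets = {}
--     for item in freq.items():
--         buckets.setdefault(item[1], []).append(item)
--     out = []
--     for c in sorted(buckets, reverse=True):
--         out += buckets.get(c, [])
--     return out
-- ===== Notes on version B (the rewrite author's own statement) =====
-- stated objective: alternative
-- what changed: The comparison sort of (word,count) items is replaced by bucket grouping: items are appended to per-count buckets in dict insertion order and the buckets are emitted in descending count order, reproducing the stable reverse sort.
import Mathlib
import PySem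

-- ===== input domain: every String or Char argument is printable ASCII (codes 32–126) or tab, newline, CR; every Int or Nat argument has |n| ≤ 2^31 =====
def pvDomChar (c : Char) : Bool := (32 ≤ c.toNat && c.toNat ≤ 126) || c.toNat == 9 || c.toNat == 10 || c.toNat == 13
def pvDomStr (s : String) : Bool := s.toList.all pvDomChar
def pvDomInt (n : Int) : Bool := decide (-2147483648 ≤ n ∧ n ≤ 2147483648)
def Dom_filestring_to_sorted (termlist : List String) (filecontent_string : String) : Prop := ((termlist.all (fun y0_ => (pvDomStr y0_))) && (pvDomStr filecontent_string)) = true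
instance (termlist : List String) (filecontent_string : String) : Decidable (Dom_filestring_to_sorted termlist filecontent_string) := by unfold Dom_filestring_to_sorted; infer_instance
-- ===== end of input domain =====

-- B replaces the comparison sort of (word,count) items by per-count buckets emitted in
-- descending count order (alternative decomposition, same cost class).

-- ===== PORT A =====
def filestring_to_sorted (termlist : List String) (filecontent_string : String) : List (String × Int) :=
  let content := PySem.Str.split₀ filecontent_string
  let ergebnis_liste := content.foldl (fun d el =>
    if !(termlist.contains el) then
      if PySem.Str.len el > 2 then
        if d.contains el then d.insert el (d.getD el 0 + 1)
        else d.insert el 1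
      else d
    else d) (PySem.Dict.empty : PySem.Dict String Int)
  PySem.List.sorted ergebnis_liste.items (fun e => e.2) true

-- ===== PORT B =====
def filestring_to_sorted_alt (termlist : List String) (filecontent_string : String) : List (String × Int) :=
  let freq := (PySem.Str.split₀ filecontent_string).foldl (fun d el =>
    if !(termlist.contains el) && PySem.Str.len el > 2 then d.insert el (d.getD el 0 + 1)
    else d) (PySem.Dict.empty : PySem.Dict String Int)
  let buckets := freq.items.foldl (fun b p => b.modify p.2 [] (fun l => l ++ [p])) PySem.Dict.empty
  (PySem.List.sorted buckets.keys (fun c => c) true).foldl (fun out c => out ++ buckets.getD c []) []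

-- ===== PRECONDITION & SPEC =====
def Spec_filestring_to_sorted (termlist : List String) (filecontent_string : String) (out : List (String × Int)) : Prop := out = filestring_to_sorted_alt termlist filecontent_string
instance (termlist : List String) (filecontent_string : String) (out : List (String × Int)) : Decidable (Spec_filestring_to_sorted termlist filecontent_string out) := by unfold Spec_filestring_to_sorted; infer_instance

-- ===== CLAIM (what is proved, stated in full; the proofs are below) =====
def Claim_equal_filestring_to_sorted : Prop := ∀ (termlist : List String) (filecontent_string : String), Dom_filestring_to_sorted termlist filecontent_string → Spec_filestring_to_sorted termlist filecontent_string (filestring_to_sorted termlist filecontent_string)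

-- ===== LEMMAS AND PROOFS =====

-- the two counting loops build the same dict
theorem pv_step_eq (termlist : List String) :
    (fun (d : PySem.Dict String Int) el =>
      if !(termlist.contains el) then
        if PySem.Str.len el > 2 then
          if d.contains el then d.insert el (d.getD el 0 + 1)
          else d.insert el 1
        else d
      else d)
    = (fun (d : PySem.Dict String Int) el =>
      if !(termlist.contains el) && PySem.Str.len el > 2 then d.insert el (d.getD el 0 + 1)
      else d) := by
  funext d el
  by_cases h1 : el ∈ termlist
  · simp [h1]
  · by_cases h2 : 2 < el.length
    · by_cases h3 : d.contains el = true
      · simp [h1, h2, h3]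
      · have h0 : d.getD el 0 = 0 :=
          PySem.Dict.getD_of_not_contains d 0 (by simpa using h3)
        simp [h1, h2, h3, h0]
    · simp [h1, h2]

theorem pv_insertBy_cons {α : Type} (before : α → α → Bool) (x y : α) (ys : List α) :
    PySem.List.insertBy before x (y :: ys)
      = if before x y then x :: y :: ys else y :: PySem.List.insertBy before x ys := rfl

theorem pv_insertBy_append_of_not_before {α : Type} (before : α → α → Bool) (x : α)
    (l1 l2 : List α) (h : ∀ y ∈ l1, before x y = false) :
    PySem.List.insertBy before x (l1 ++ l2) = l1 ++ PySem.List.insertBy before x l2 := by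
  induction l1 with
  | nil => simp
  | cons y l1 ih =>
      have hy : before x y = false := h y (by simp)
      rw [List.cons_append, pv_insertBy_cons, hy]
      simp [ih (fun z hz => h z (by simp [hz]))]

theorem pv_insertBy_eq_cons {α : Type} (before : α → α → Bool) (x : α)
    (l : List α) (h : ∀ y ∈ l, before x y = true) :
    PySem.List.insertBy before x l = x :: l := by
  cases l with
  | nil => rfl
  | cons y t => rw [pv_insertBy_cons, h y (by simp)]; simp

theorem pv_insert_flatMap (x : String × Int) (cs : List Int) (ys : List (String × Int))
    (hdesc : cs.Pairwise (fun a b => b < a)) (hx : x.2 ∈ cs) :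
    PySem.List.insertBy (fun a b => decide (b.2 < a.2)) x
      (cs.flatMap (fun c => ys.filter (fun p => p.2 == c)))
    = cs.flatMap (fun c => (ys ++ [x]).filter (fun p => p.2 == c)) := by
  induction cs with
  | nil => simp at hx
  | cons c cs ih =>
      have hlt : ∀ c' ∈ cs, c' < c := by
        intro c' hc'; exact (List.pairwise_cons.mp hdesc).1 c' hc'
      have hdesc' := (List.pairwise_cons.mp hdesc).2
      have hbucket : ∀ y ∈ ys.filter (fun p => p.2 == c), (y.2 : Int) = c := by
        intro y hy
        simpa using List.of_mem_filter hy
      by_cases hxc : x.2 = c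
      · -- x lands at the end of the c-bucket
        have hxnot : x.2 ∉ cs := by
          intro hmem; exact absurd (hlt _ hmem) (by simp [hxc])
        have hrest : ∀ y ∈ cs.flatMap (fun c' => ys.filter (fun p => p.2 == c')),
            (decide (y.2 < x.2) : Bool) = true := by
          intro y hy
          rcases List.mem_flatMap.mp hy with ⟨c', hc', hyf⟩
          have : (y.2 : Int) = c' := by simpa using List.of_mem_filter hyf
          simp [this, hxc, hlt c' hc']
        have h1 : (ys ++ [x]).filter (fun p => p.2 == c) = ys.filter (fun p => p.2 == c) ++ [x] := by
          simp [List.filter_append, hxc]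
        have h2 : cs.flatMap (fun c' => (ys ++ [x]).filter (fun p => p.2 == c'))
            = cs.flatMap (fun c' => ys.filter (fun p => p.2 == c')) := by
          apply List.flatMap_congr
          intro c' hc'
          have hne : ¬ (x.2 = c') := by intro h; exact hxnot (h ▸ hc')
          simp [List.filter_append, hne]
        rw [List.flatMap_cons,
          pv_insertBy_append_of_not_before _ _ _ _
            (by intro y hy; simp [hbucket y hy, hxc]),
          pv_insertBy_eq_cons _ _ _ hrest,
          List.flatMap_cons, h1, h2]
        simp
      · -- x belongs to a later bucket
        have hx' : x.2 ∈ cs := by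
          rcases List.mem_cons.mp hx with h | h
          · exact absurd h hxc
          · exact h
        have hxlt : x.2 < c := hlt _ hx'
        have h1 : (ys ++ [x]).filter (fun p => p.2 == c) = ys.filter (fun p => p.2 == c) := by
          simp [List.filter_append, hxc]
        rw [List.flatMap_cons,
          pv_insertBy_append_of_not_before _ _ _ _
            (by intro y hy; simp [hbucket y hy]; omega),
          ih hdesc' hx', List.flatMap_cons, h1]

theorem pv_sortedRev_eq_flatMap (ys : List (String × Int)) (cs : List Int)
    (hdesc : cs.Pairwise (fun a b => b < a))
    (hcov : ∀ p ∈ ys, p.2 ∈ cs) :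
    PySem.List.sorted ys (fun e => e.2) true
      = cs.flatMap (fun c => ys.filter (fun p => p.2 == c)) := by
  induction ys using List.reverseRecOn with
  | nil => simp [PySem.List.sorted]
  | append_singleton ys x ih =>
      rw [PySem.List.sorted_rev_eq_foldl_insertBy, List.foldl_append,
        ← PySem.List.sorted_rev_eq_foldl_insertBy]
      simp only [List.foldl_cons, List.foldl_nil]
      rw [ih (fun p hp => hcov p (by simp [hp]))]
      exact pv_insert_flatMap x cs ys hdesc (hcov x (by simp))

-- B's bucket phase, characterised for an arbitrary items list, equals the stable reverse sort
theorem pv_B_char (items : List (String × Int)) :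
    (PySem.List.sorted
        (items.foldl (fun b p => b.modify p.2 [] (fun l => l ++ [p])) (PySem.Dict.empty : PySem.Dict Int (List (String × Int)))).keys
        (fun c => c) true).foldl
      (fun out c =>
        out ++ (items.foldl (fun b p => b.modify p.2 [] (fun l => l ++ [p]))
            (PySem.Dict.empty : PySem.Dict Int (List (String × Int)))).getD c []) []
    = PySem.List.sorted items (fun e => e.2) true := by
  set buckets := items.foldl (fun b p => b.modify p.2 [] (fun l => l ++ [p])) (PySem.Dict.empty : PySem.Dict Int (List (String × Int)))
    with hbuckets
  have hfold : buckets
      = (items.map (fun p => (p.2, p))).foldl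
          (fun b q => b.modify q.1 [] (fun l => l ++ [q.2])) PySem.Dict.empty := by
    rw [hbuckets, List.foldl_map]
  have hgetD : ∀ c : Int, buckets.getD c [] = items.filter (fun p => p.2 == c) := by
    intro c
    rw [hfold, PySem.Dict.getD_foldl_modify_append]
    simp [List.filter_map, Function.comp_def]
  have hkeys : buckets.keys = PySem.Set.ofList (items.map (fun p => p.2)) := by
    rw [hbuckets]
    have := PySem.Dict.keys_foldl_modify_key items (fun p => p.2) ([] : List (String × Int))
      (fun _ p l => l ++ [p]) (PySem.Dict.empty : PySem.Dict Int (List (String × Int)))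
    simpa [PySem.Set.update_nil_left] using this
  set cs := PySem.List.sorted buckets.keys (fun c => c) true with hcs
  have hnd : cs.Nodup := by
    have h := PySem.Set.nodup_ofList (items.map (fun p => p.2))
    rw [← hkeys] at h
    rw [hcs]
    exact (PySem.List.sorted_perm buckets.keys (fun c => c) true).symm.nodup h
  have hle : cs.Pairwise (fun a b => b ≤ a) := by
    rw [hcs]; exact PySem.List.sorted_pairwise_rev buckets.keys (fun c => c)
  have hdesc : cs.Pairwise (fun a b => b < a) :=
    (hle.and hnd).imp (fun h => lt_of_le_of_ne h.1 (Ne.symm h.2))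
  have hcov : ∀ p ∈ items, p.2 ∈ cs := by
    intro p hp
    rw [hcs, PySem.List.mem_sorted, hkeys, PySem.Set.mem_ofList]
    exact List.mem_map.mpr ⟨p, hp, rfl⟩
  rw [pv_sortedRev_eq_flatMap items cs hdesc hcov, PySem.List.foldl_append_eq_flatMap]
  simp only [List.nil_append]
  exact List.flatMap_congr (fun c _ => hgetD c)

-- ===== VERDICT (by name: the statement is the Claim_ definition above) =====
theorem filestring_to_sorted_spec : Claim_equal_filestring_to_sorted := by
  intro termlist s _
  unfold Spec_filestring_to_sorted filestring_to_sorted filestring_to_sorted_alt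
  rw [pv_step_eq]
  exact (pv_B_char _).symm
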